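-- pv_equiv track=rewrite | github.com/chloeeekim/TIL | Algorithm/Programmers/Python/340212.py | can_solve
-- ===== SOURCE A (Python) =====
-- def can_solve(diffs, level, times, limit):
--     total = 0
--     for i, diff in enumerate(diffs):
--         if diff <= level:
--             total += times[i]
--         else:
--             total += (times[i] + (times[i] + times[i-1]) * (diff - level))
--         if total > limit:
--             return False
--     return True
-- ===== SOURCE B (Python) =====
-- def can_solve(diffs, level, times, limit):
--     # Backward scan: best = maximum prefix sum of contributions for the suffix
--     # starting at i, via the recurrence best_i = c_i + max(0, best_{i+1}).
--     # All prefix sums are <= limit iff the overall maximum prefix sum is.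
--     best = None
--     for i in reversed(range(len(diffs))):
--         d = diffs[i]
--         t = times[i]
--         c = t if d <= level else t + (t + times[i - 1]) * (d - level)
--         best = c if best is None else c + max(0, best)
--     return best is None or best <= limit
-- ===== Notes on version B (the rewrite author's own statement) =====
-- stated objective: alternative
-- what changed: Replaces A's forward accumulate-and-early-exit loop with a backward scan computing the maximum prefix sum via the suffix recurrence best_i = c_i + max(0, best_{i+1}), with a single comparison against limit at the end; no running total, prefix list or early exit.
-- outside the precondition, e.g. on can_solve([0, 5, 0], 0, [1], 0): A returns False, B raises IndexError
import Mathlib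
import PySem

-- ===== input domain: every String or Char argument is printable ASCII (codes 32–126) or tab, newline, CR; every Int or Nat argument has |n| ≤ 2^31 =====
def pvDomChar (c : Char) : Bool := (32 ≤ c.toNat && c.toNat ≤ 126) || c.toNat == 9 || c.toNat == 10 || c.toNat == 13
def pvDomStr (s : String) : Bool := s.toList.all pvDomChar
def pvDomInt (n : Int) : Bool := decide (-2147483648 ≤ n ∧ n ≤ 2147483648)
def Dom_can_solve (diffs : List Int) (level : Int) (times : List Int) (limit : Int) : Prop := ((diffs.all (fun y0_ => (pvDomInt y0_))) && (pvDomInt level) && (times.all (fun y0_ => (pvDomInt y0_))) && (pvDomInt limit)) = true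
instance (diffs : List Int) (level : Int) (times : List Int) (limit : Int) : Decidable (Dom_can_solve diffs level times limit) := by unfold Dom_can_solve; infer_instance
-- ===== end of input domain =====

-- B replaces A's forward accumulate-and-early-exit loop with a backward scan computing
-- the maximum prefix sum via the suffix recurrence best_i = c_i + max(0, best_{i+1}),
-- compared against limit once at the end; alternative decomposition, same cost.

-- ===== PORT A =====
def canSolveLoopA (level limit : Int) (times : List Int) : List (Int × Int) → Int → Bool
  | [], _ => true
  | (i, diff) :: rest, total =>
    let total' :=
      if diff ≤ level then total + PySem.List.pyGetD times i 0
      else total + (PySem.List.pyGetD times i 0 +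
        (PySem.List.pyGetD times i 0 + PySem.List.pyGetD times (i - 1) 0) * (diff - level))
    if total' > limit then false else canSolveLoopA level limit times rest total'

def can_solve (diffs : List Int) (level : Int) (times : List Int) (limit : Int) : Bool :=
  canSolveLoopA level limit times (PySem.List.enumerate diffs 0) 0

-- ===== PORT B =====
-- contribution of problem (i, d): t if d <= level else t + (t + times[i-1]) * (d - level)
def contribB (level : Int) (times : List Int) (p : Int × Int) : Int :=
  if p.2 ≤ level then PySem.List.pyGetD times p.1 0
  else PySem.List.pyGetD times p.1 0 +
    (PySem.List.pyGetD times p.1 0 + PySem.List.pyGetD times (p.1 - 1) 0) * (p.2 - level)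

-- the backward `for i in reversed(range(len(diffs)))` loop over `best`
def can_solve_alt (diffs : List Int) (level : Int) (times : List Int) (limit : Int) : Bool :=
  let best := (PySem.List.enumerate diffs 0).reverse.foldl
    (fun (best : Option Int) p =>
      let c := contribB level times p
      some (match best with | none => c | some b => c + max 0 b)) none
  match best with
  | none => true
  | some b => decide (b ≤ limit)

-- ===== PRECONDITION & SPEC =====
-- Pre_ excludes inputs where diffs is longer than times: there Python A either raises
-- IndexError or (when the running total exceeds limit before the first out-of-range
-- index) returns False early, while B's backward scan indexes every position first and
-- raises IndexError.
def Pre_can_solve (diffs : List Int) (level : Int) (times : List Int) (limit : Int) : Prop :=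
  diffs.length ≤ times.length
instance (diffs : List Int) (level : Int) (times : List Int) (limit : Int) : Decidable (Pre_can_solve diffs level times limit) := by unfold Pre_can_solve; infer_instance

def pvWitness_can_solve : List Int × Int × List Int × Int := ([1, 3], 2, [2, 5], 20)

def Spec_can_solve (diffs : List Int) (level : Int) (times : List Int) (limit : Int) (out : Bool) : Prop := out = can_solve_alt diffs level times limit
instance (diffs : List Int) (level : Int) (times : List Int) (limit : Int) (out : Bool) : Decidable (Spec_can_solve diffs level times limit out) := by unfold Spec_can_solve; infer_instance

-- ===== CLAIM (what is proved, stated in full; the proofs are below) =====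
def Claim_equal_can_solve : Prop := ∀ (diffs : List Int) (level : Int) (times : List Int) (limit : Int), Dom_can_solve diffs level times limit → Pre_can_solve diffs level times limit → Spec_can_solve diffs level times limit (can_solve diffs level times limit)

-- ===== LEMMAS AND PROOFS =====

-- structural (right-to-left) form of B's backward fold
def worstW (level : Int) (times : List Int) : List (Int × Int) → Option Int
  | [] => none
  | p :: rest => some (contribB level times p + max 0 ((worstW level times rest).getD 0))

lemma foldl_reverse_eq_worstW (level : Int) (times : List Int) (pairs : List (Int × Int)) :
    pairs.reverse.foldl
      (fun (best : Option Int) p =>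
        let c := contribB level times p
        some (match best with | none => c | some b => c + max 0 b)) none
      = worstW level times pairs := by
  rw [List.foldl_reverse]
  induction pairs with
  | nil => rfl
  | cons p rest ih =>
    simp only [List.foldr_cons, ih, worstW]
    cases worstW level times rest with
    | none => simp
    | some b => simp

lemma loopA_eq_worstW (level limit : Int) (times : List Int) (pairs : List (Int × Int)) :
    ∀ (total : Int),
      canSolveLoopA level limit times pairs total
        = match worstW level times pairs with
          | none => true
          | some b => decide (total + b ≤ limit) := by
  induction pairs with
  | nil => intro total; rfl
  | cons pd rest ih =>
    intro total
    obtain ⟨i, diff⟩ := pd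
    have hc : (if diff ≤ level then total + PySem.List.pyGetD times i 0
        else total + (PySem.List.pyGetD times i 0 +
          (PySem.List.pyGetD times i 0 + PySem.List.pyGetD times (i - 1) 0) * (diff - level)))
        = total + contribB level times (i, diff) := by
      unfold contribB; split_ifs <;> ring
    set c := contribB level times (i, diff) with hcdef
    simp only [canSolveLoopA, hc, worstW, ← hcdef]
    by_cases hgt : total + c > limit
    · rw [if_pos hgt]
      have : ¬ (total + (c + max 0 ((worstW level times rest).getD 0)) ≤ limit) := by
        have := le_max_left 0 ((worstW level times rest).getD 0); omega
      simp [this]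
    · rw [if_neg hgt, ih (total + c)]
      cases hw : worstW level times rest with
      | none => simp; omega
      | some b =>
        simp only [Option.getD_some]
        by_cases h : total + c + b ≤ limit
        · have h2 : total + (c + max 0 b) ≤ limit := by omega
          simp [h, h2]
        · have h2 : ¬ total + (c + max 0 b) ≤ limit := by omega
          simp [h, h2]


-- ===== VERDICT (by name: the statement is the Claim_ definition above) =====
theorem can_solve_spec : Claim_equal_can_solve := by
  intro diffs level times limit _ _
  unfold Spec_can_solve can_solve can_solve_alt
  rw [foldl_reverse_eq_worstW, loopA_eq_worstW]
  cases worstW level times (PySem.List.enumerate diffs 0) with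
  | none => rfl
  | some b => simp
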